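-- pv_equiv track=rewrite | github.com/pypi-data/pypi-mirror-362 | packages/discoursemap/discoursemap-1.2.2.tar.gz/discoursemap-1.2.2/discoursemap/modules/endpoint_module.py | _extract_interesting_headers
-- ===== SOURCE A (Python) =====
-- def _extract_interesting_headers(headers):
--     """Extract interesting HTTP headers"""
--     interesting = {}
--     interesting_header_names = [
--         'Server', 'X-Powered-By', 'X-Frame-Options',
--         'X-Content-Type-Options', 'X-XSS-Protection',
--         'Strict-Transport-Security', 'Content-Security-Policy',
--         'X-Discourse-Route', 'X-Discourse-Username'
--     ]
--
--     for header_name in interesting_header_names: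
--         if header_name in headers:
--             interesting[header_name] = headers[header_name]
--
--     return interesting
-- ===== SOURCE B (Python) =====
-- _INTERESTING_NAMES = (
--     'Server', 'X-Powered-By', 'X-Frame-Options',
--     'X-Content-Type-Options', 'X-XSS-Protection',
--     'Strict-Transport-Security', 'Content-Security-Policy',
--     'X-Discourse-Route', 'X-Discourse-Username'
-- )
--
--
-- def _extract_interesting_headers(headers):
--     """Extract interesting HTTP headers"""
--     def go(names):
--         if not names:
--             return {}
--         name, rest = names[0], names[1:]
--         tail = go(rest)
--         if name in headers:
--             out = {name: headers[name]}
--             out.update(tail)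
--             return out
--         return tail
--     return go(list(_INTERESTING_NAMES))
-- ===== Notes on version B (the rewrite author's own statement) =====
-- stated objective: alternative
-- what changed: B replaces A's imperative loop that accumulates into a dict with a recursive decomposition over the fixed name list: it recurses on the tail of the names, then prepends the head's entry (if present) to the recursively built dict, building the result back-to-front.
import Mathlib
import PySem

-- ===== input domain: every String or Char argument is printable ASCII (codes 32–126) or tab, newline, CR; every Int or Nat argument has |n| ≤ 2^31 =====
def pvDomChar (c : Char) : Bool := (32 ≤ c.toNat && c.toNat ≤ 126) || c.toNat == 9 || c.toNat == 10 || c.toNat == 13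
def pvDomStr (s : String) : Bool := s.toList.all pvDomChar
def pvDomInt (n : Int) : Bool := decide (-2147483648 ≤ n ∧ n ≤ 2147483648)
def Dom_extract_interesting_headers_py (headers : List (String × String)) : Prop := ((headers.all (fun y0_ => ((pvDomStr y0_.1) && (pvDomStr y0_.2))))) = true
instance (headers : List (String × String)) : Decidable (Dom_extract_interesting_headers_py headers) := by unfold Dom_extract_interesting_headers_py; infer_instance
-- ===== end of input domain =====

-- B's objective: an alternative decomposition — structural recursion on the fixed name list
-- that builds the result back-to-front, instead of A's loop accumulating into a dict.

-- ===== PORT A =====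
-- A's local list 'interesting_header_names'
def interestingNamesA : List String :=
  ["Server", "X-Powered-By", "X-Frame-Options",
   "X-Content-Type-Options", "X-XSS-Protection",
   "Strict-Transport-Security", "Content-Security-Policy",
   "X-Discourse-Route", "X-Discourse-Username"]

-- 'header_name in headers' is the dict lookup succeeding; 'headers[header_name]' is that value
def extract_interesting_headers_py (headers : List (String × String)) : List (String × String) :=
  let hd : PySem.Dict String String := PySem.Dict.mk headers
  (interestingNamesA.foldl
    (fun (interesting : PySem.Dict String String) name =>
      match hd.get? name with
      | some v => interesting.insert name v
      | none => interesting)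
    PySem.Dict.empty).items

-- ===== PORT B =====
-- B's module tuple '_INTERESTING_NAMES'
def interestingNamesB : List String :=
  ["Server", "X-Powered-By", "X-Frame-Options",
   "X-Content-Type-Options", "X-XSS-Protection",
   "Strict-Transport-Security", "Content-Security-Policy",
   "X-Discourse-Route", "X-Discourse-Username"]

-- B's inner recursion 'go': the dict {name: headers[name], **tail} is the cons '(name, v) :: tail'
-- (exact here: the fixed names are pairwise distinct, so 'name' never occurs in 'tail')
def goB (hd : PySem.Dict String String) : List String → List (String × String)
  | [] => []
  | name :: rest =>
    let tail := goB hd rest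
    match hd.get? name with
    | some v => (name, v) :: tail
    | none => tail

def extract_interesting_headers_py_alt (headers : List (String × String)) : List (String × String) :=
  goB (PySem.Dict.mk headers) interestingNamesB

-- ===== PRECONDITION & SPEC =====
def Spec_extract_interesting_headers_py (headers : List (String × String)) (out : List (String × String)) : Prop := out = extract_interesting_headers_py_alt headers
instance (headers : List (String × String)) (out : List (String × String)) : Decidable (Spec_extract_interesting_headers_py headers out) := by unfold Spec_extract_interesting_headers_py; infer_instance

-- ===== CLAIM =====
def Claim_equal_extract_interesting_headers_py : Prop := ∀ (headers : List (String × String)), Dom_extract_interesting_headers_py headers → Spec_extract_interesting_headers_py headers (extract_interesting_headers_py headers)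

-- ===== LEMMAS AND PROOFS =====

-- A's accumulating fold over names fresh to the accumulator appends exactly B's recursion
theorem foldA_items_eq_goB (hd : PySem.Dict String String) (names : List String)
    (d : PySem.Dict String String)
    (hfresh : ∀ n ∈ names, d.contains n = false) (hnd : names.Nodup) :
    (names.foldl
      (fun (interesting : PySem.Dict String String) name =>
        match hd.get? name with
        | some v => interesting.insert name v
        | none => interesting) d).items
    = d.items ++ goB hd names := by
  induction names generalizing d with
  | nil => simp [goB]
  | cons n rest ih =>
    simp only [List.foldl_cons, goB]
    cases hg : hd.get? n with
    | none =>
      rw [ih d (fun m hm => hfresh m (by simp [hm])) (List.Nodup.of_cons hnd)]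
    | some v =>
      have hnc : d.contains n = false := hfresh n (by simp)
      have hrest : ∀ m ∈ rest, (d.insert n v).contains m = false := by
        intro m hm
        rw [PySem.Dict.contains_insert]
        have hmn : m ≠ n := by
          intro h; subst h
          exact (List.nodup_cons.mp hnd).1 hm
        simp [hmn, hfresh m (by simp [hm])]
      rw [ih (d.insert n v) hrest (List.Nodup.of_cons hnd)]
      rw [PySem.Dict.items_insert_of_not_contains _ _ hnc]
      simp

-- ===== VERDICT =====
theorem extract_interesting_headers_py_spec : Claim_equal_extract_interesting_headers_py := by
  intro headers _
  unfold Spec_extract_interesting_headers_py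
  unfold extract_interesting_headers_py extract_interesting_headers_py_alt
  have h := foldA_items_eq_goB (PySem.Dict.mk headers) interestingNamesA PySem.Dict.empty
    (by intro n _; simp [PySem.Dict.contains, PySem.Dict.empty]) (by decide)
  simpa [PySem.Dict.empty, interestingNamesA, interestingNamesB] using h
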